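-- pv_equiv track=rewrite | github.com/poipoiuroi/naraka-minigame-solver | naraka_solver.py | resolve_cascade
-- ===== SOURCE A (Python) =====
-- def find_matches(grid):
--     to_remove = set()
--     n = len(grid)
--     for r in range(n):
--         c = 0
--         while c < n:
--             val = grid[r][c]
--             if val <= 0:
--                 c += 1
--                 continue
--             start = c
--             while c + 1 < n and grid[r][c + 1] == val:
--                 c += 1
--             if c - start + 1 >= 3:
--                 for cc in range(start, c + 1):
--                     to_remove.add((r, cc))
--             c += 1
--     for c in range(n):
--         r = 0
--         while r < n:
--             val = grid[r][c]
--             if val <= 0: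
--                 r += 1
--                 continue
--             start = r
--             while r + 1 < n and grid[r + 1][c] == val:
--                 r += 1
--             if r - start + 1 >= 3:
--                 for rr in range(start, r + 1):
--                     to_remove.add((rr, c))
--             r += 1
--     return to_remove
--
-- def drop_blocks(grid):
--     n = len(grid)
--     for c in range(n):
--         write_row = n - 1
--         for r in range(n - 1, -1, -1):
--             if grid[r][c] > 0:
--                 if write_row != r:
--                     grid[write_row][c] = grid[r][c]
--                 write_row -= 1
--         for r in range(write_row, -1, -1):
--             grid[r][c] = 0
--
-- def resolve_cascade(grid):
--     total_points = 0
--     while True: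
--         matches = find_matches(grid)
--         if not matches:
--             break
--         total_points += len(matches)
--         for (r, c) in matches:
--             grid[r][c] = 0
--         drop_blocks(grid)
--     return total_points
-- ===== SOURCE B (Python) =====
-- # B: match detection by fixed-width sliding 3-windows instead of run-length while-scans.
-- # Note: like A, this mutates `grid` in place; the equivalence claimed is about the return value.
-- def find_matches(grid):
--     to_remove = set()
--     n = len(grid)
--     for r in range(n):
--         for c in range(n - 2):
--             val = grid[r][c]
--             if val > 0 and grid[r][c + 1] == val and grid[r][c + 2] == val:
--                 to_remove.add((r, c))
--                 to_remove.add((r, c + 1))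
--                 to_remove.add((r, c + 2))
--     for c in range(n):
--         for r in range(n - 2):
--             val = grid[r][c]
--             if val > 0 and grid[r + 1][c] == val and grid[r + 2][c] == val:
--                 to_remove.add((r, c))
--                 to_remove.add((r + 1, c))
--                 to_remove.add((r + 2, c))
--     return to_remove
--
-- def drop_blocks(grid):
--     n = len(grid)
--     for c in range(n):
--         write_row = n - 1
--         for r in range(n - 1, -1, -1):
--             if grid[r][c] > 0:
--                 if write_row != r:
--                     grid[write_row][c] = grid[r][c]
--                 write_row -= 1
--         for r in range(write_row, -1, -1):
--             grid[r][c] = 0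
--
-- def resolve_cascade(grid):
--     total_points = 0
--     while True:
--         matches = find_matches(grid)
--         if not matches:
--             break
--         total_points += len(matches)
--         for (r, c) in matches:
--             grid[r][c] = 0
--         drop_blocks(grid)
--     return total_points
-- ===== Notes on version B (the rewrite author's own statement) =====
-- stated objective: alternative
-- what changed: Match detection is rewritten from run-length while-loop scanning (find maximal runs, add them if length>=3) to fixed-width sliding 3-window sweeps (add the three cells of every equal positive triple); cascade and drop stay as in A. Pre_ excludes ragged grids with a row shorter than len(grid), on which A raises IndexError.
import Mathlib
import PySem

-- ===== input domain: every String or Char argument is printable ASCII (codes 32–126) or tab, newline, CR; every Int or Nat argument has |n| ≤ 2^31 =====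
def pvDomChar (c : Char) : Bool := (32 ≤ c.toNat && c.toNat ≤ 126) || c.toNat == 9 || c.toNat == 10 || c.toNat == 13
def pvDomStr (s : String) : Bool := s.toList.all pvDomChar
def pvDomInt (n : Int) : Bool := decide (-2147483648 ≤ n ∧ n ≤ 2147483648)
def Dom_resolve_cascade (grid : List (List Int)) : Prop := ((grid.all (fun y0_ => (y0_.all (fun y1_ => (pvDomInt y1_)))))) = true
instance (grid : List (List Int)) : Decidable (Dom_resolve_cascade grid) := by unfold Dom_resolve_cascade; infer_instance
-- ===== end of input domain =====

-- B changes find_matches from run-length while-scans to sliding 3-window sweeps (alternative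
-- decomposition, same cost); cascade/drop are unchanged.  Both Pythons mutate `grid` in place;
-- the equivalence proved here is about the RETURN value only.

-- ===== PORT A =====
-- grid[r][c] for Nat indices; exact under Pre_ (0 ≤ r,c < n ≤ every row length).
def pvGet (grid : List (List Int)) (r c : Nat) : Int := (grid.getD r []).getD c 0

-- grid[r][c] = v
def pvSet (grid : List (List Int)) (r c : Nat) (v : Int) : List (List Int) :=
  grid.modify r (fun row => row.set c v)

-- inner `while c + 1 < n and grid[r][c+1] == val: c += 1` (A runs it once per row and once per column,
-- with the line accessor as the only difference)
def pvRunEnd (f : Nat → Int) (n c : Nat) (val : Int) : Nat :=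
  if _h : c + 1 < n ∧ f (c + 1) = val then pvRunEnd f n (c + 1) val else c
termination_by n - c
decreasing_by omega

lemma pvRunEnd_ge (f : Nat → Int) (n c : Nat) (val : Int) : c ≤ pvRunEnd f n c val := by
  unfold pvRunEnd
  split
  · exact le_trans (by omega) (pvRunEnd_ge f n (c + 1) val)
  · exact le_refl c
termination_by n - c
decreasing_by omega

-- A's outer `while c < n` scan of one line: collects (in order) the indices of every maximal run
-- of length ≥ 3 of equal positive values.
def pvScan (f : Nat → Int) (n c : Nat) (acc : List Nat) : List Nat :=
  if _h : c < n then
    let val := f c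
    if val ≤ 0 then pvScan f n (c + 1) acc
    else
      let e := pvRunEnd f n c val
      if 3 ≤ e - c + 1 then pvScan f n (e + 1) (acc ++ List.range' c (e - c + 1))
      else pvScan f n (e + 1) acc
  else acc
termination_by n - c
decreasing_by
  · omega
  · have := pvRunEnd_ge f n c (f c); omega
  · have := pvRunEnd_ge f n c (f c); omega

-- find_matches (A): run-length scan of every row, then every column
def pvFindA (grid : List (List Int)) : PySem.Set (Nat × Nat) :=
  let n := grid.length
  let s := (List.range n).foldl
    (fun s r => (pvScan (fun c => pvGet grid r c) n 0 []).foldl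
      (fun s cc => PySem.Set.add s (r, cc)) s) PySem.Set.empty
  (List.range n).foldl
    (fun s c => (pvScan (fun r => pvGet grid r c) n 0 []).foldl
      (fun s rr => PySem.Set.add s (rr, c)) s) s

-- `for (r, c) in matches: grid[r][c] = 0`  (order-independent: all writes are 0)
def pvZero (m : List (Nat × Nat)) (grid : List (List Int)) : List (List Int) :=
  m.foldl (fun g rc => pvSet g rc.1 rc.2 0) grid

-- drop_blocks, one column (write_row may reach -1, hence Int; at every write write_row ≥ r ≥ 0)
def pvDropCol (g : List (List Int)) (n c : Nat) : List (List Int) :=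
  let p := (PySem.List.pyRange ((n : Int) - 1) (-1) (-1)).foldl
    (fun (st : List (List Int) × Int) r =>
      if 0 < pvGet st.1 r.toNat c then
        ((if st.2 ≠ r then pvSet st.1 st.2.toNat c (pvGet st.1 r.toNat c) else st.1), st.2 - 1)
      else st) (g, (n : Int) - 1)
  (PySem.List.pyRange p.2 (-1) (-1)).foldl (fun g r => pvSet g r.toNat c 0) p.1

def pvDrop (g : List (List Int)) : List (List Int) :=
  (List.range g.length).foldl (fun g c => pvDropCol g g.length c) g

-- the `while True` cascade; fuel n*n+1 suffices: every productive round zeroes ≥ 3 positive cells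
-- of the n×n region and drop_blocks preserves their count, so there are at most n*n/3 rounds
def pvCascadeA : Nat → List (List Int) → Int → Int
  | 0, _, total => total
  | fuel + 1, g, total =>
    let m := pvFindA g
    if m = [] then total
    else pvCascadeA fuel (pvDrop (pvZero m g)) (total + (m.length : Int))

def resolve_cascade (grid : List (List Int)) : Int :=
  pvCascadeA (grid.length * grid.length + 1) grid 0

-- ===== PORT B =====
-- find_matches (B): sliding 3-windows over rows, then over columns
def pvFindB (grid : List (List Int)) : PySem.Set (Nat × Nat) :=
  let n := grid.length
  let s := (List.range n).foldl
    (fun s r => (List.range (n - 2)).foldl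
      (fun s c =>
        let val := pvGet grid r c
        if 0 < val ∧ pvGet grid r (c + 1) = val ∧ pvGet grid r (c + 2) = val then
          PySem.Set.add (PySem.Set.add (PySem.Set.add s (r, c)) (r, c + 1)) (r, c + 2)
        else s) s) PySem.Set.empty
  (List.range n).foldl
    (fun s c => (List.range (n - 2)).foldl
      (fun s r =>
        let val := pvGet grid r c
        if 0 < val ∧ pvGet grid (r + 1) c = val ∧ pvGet grid (r + 2) c = val then
          PySem.Set.add (PySem.Set.add (PySem.Set.add s (r, c)) (r + 1, c)) (r + 2, c)
        else s) s) s

def pvCascadeB : Nat → List (List Int) → Int → Int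
  | 0, _, total => total
  | fuel + 1, g, total =>
    let m := pvFindB g
    if m = [] then total
    else pvCascadeB fuel (pvDrop (pvZero m g)) (total + (m.length : Int))

def resolve_cascade_alt (grid : List (List Int)) : Int :=
  pvCascadeB (grid.length * grid.length + 1) grid 0

-- ===== PRECONDITION & SPEC =====
-- Pre_ excludes exactly the ragged grids with a row shorter than len(grid): there the Python A
-- raises IndexError (its first find_matches pass reads grid[r][c] for every r, c < len(grid)).
def Pre_resolve_cascade (grid : List (List Int)) : Prop :=
  ∀ row ∈ grid, grid.length ≤ row.length
instance (grid : List (List Int)) : Decidable (Pre_resolve_cascade grid) := by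
  unfold Pre_resolve_cascade; infer_instance

def pvWitness_resolve_cascade : List (List Int) := [[1, 1, 1], [2, 3, 2], [3, 2, 3]]

def Spec_resolve_cascade (grid : List (List Int)) (out : Int) : Prop := out = resolve_cascade_alt grid
instance (grid : List (List Int)) (out : Int) : Decidable (Spec_resolve_cascade grid out) := by
  unfold Spec_resolve_cascade; infer_instance

-- ===== CLAIM (what is proved, stated in full; the proofs are below) =====
def Claim_equal_resolve_cascade : Prop := ∀ (grid : List (List Int)), Dom_resolve_cascade grid → Pre_resolve_cascade grid → Spec_resolve_cascade grid (resolve_cascade grid)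

-- ===== LEMMAS AND PROOFS =====

-- the three cells starting at s form an equal positive triple of the line f (of length n)
def pvTriple (f : Nat → Int) (n s : Nat) : Prop :=
  s + 2 < n ∧ 0 < f s ∧ f (s + 1) = f s ∧ f (s + 2) = f s

-- cell j belongs to some triple
def pvMatched (f : Nat → Int) (n j : Nat) : Prop :=
  ∃ s, s ≤ j ∧ j ≤ s + 2 ∧ pvTriple f n s

-- cell j belongs to some constant positive interval [a,b] ⊆ [c,n) of length ≥ 3
def pvQ (f : Nat → Int) (n c j : Nat) : Prop :=
  ∃ a b, c ≤ a ∧ a ≤ j ∧ j ≤ b ∧ b < n ∧ a + 2 ≤ b ∧ 0 < f a ∧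
    ∀ k, a ≤ k → k ≤ b → f k = f a

lemma pvRunEnd_lt (f : Nat → Int) (n c : Nat) (val : Int) (h : c < n) :
    pvRunEnd f n c val < n := by
  unfold pvRunEnd
  split
  · exact pvRunEnd_lt f n (c + 1) val (by omega)
  · exact h
termination_by n - c
decreasing_by omega

lemma pvRunEnd_const (f : Nat → Int) (n c : Nat) (val : Int) (h0 : f c = val) :
    ∀ k, c ≤ k → k ≤ pvRunEnd f n c val → f k = val := by
  unfold pvRunEnd
  split
  · rename_i h
    intro k hk1 hk2
    rcases Nat.eq_or_lt_of_le hk1 with rfl | h'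
    · exact h0
    · exact pvRunEnd_const f n (c + 1) val h.2 k (by omega) hk2
  · intro k hk1 hk2
    have : k = c := by omega
    subst this; exact h0
termination_by n - c
decreasing_by omega

lemma pvRunEnd_max (f : Nat → Int) (n c : Nat) (val : Int) :
    ¬ (pvRunEnd f n c val + 1 < n ∧ f (pvRunEnd f n c val + 1) = val) := by
  unfold pvRunEnd
  split
  · exact pvRunEnd_max f n (c + 1) val
  · assumption
termination_by n - c
decreasing_by omega

lemma mem_pvScan_aux (f : Nat → Int) (n j : Nat) :
    ∀ d c acc, n ≤ c + d → (j ∈ pvScan f n c acc ↔ j ∈ acc ∨ pvQ f n c j) := by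
  intro d
  induction d with
  | zero =>
    intro c acc h
    unfold pvScan
    rw [dif_neg (by omega : ¬ c < n)]
    constructor
    · exact Or.inl
    · rintro (h1 | ⟨a, b, h1, h2, h3, h4, h5, h6, h7⟩)
      · exact h1
      · omega
  | succ d IH =>
    intro c acc h
    by_cases hc : c < n
    · unfold pvScan
      rw [dif_pos hc]
      by_cases hv : f c ≤ 0
      · simp only [hv, if_pos]
        rw [IH (c + 1) acc (by omega)]
        have : pvQ f n (c + 1) j ↔ pvQ f n c j := by
          constructor
          · rintro ⟨a, b, h1, hrest⟩; exact ⟨a, b, by omega, hrest⟩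
          · rintro ⟨a, b, h1, h2, h3, h4, h5, h6, h7⟩
            refine ⟨a, b, ?_, h2, h3, h4, h5, h6, h7⟩
            rcases Nat.eq_or_lt_of_le h1 with rfl | h'
            · exact absurd h6 (by simpa using hv)
            · omega
        rw [this]
      · simp only [hv, if_false]
        have hec : c ≤ pvRunEnd f n c (f c) := pvRunEnd_ge f n c (f c)
        have hen : pvRunEnd f n c (f c) < n := pvRunEnd_lt f n c (f c) hc
        have hconst := pvRunEnd_const f n c (f c) rfl
        have hmax := pvRunEnd_max f n c (f c)
        set e := pvRunEnd f n c (f c) with he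
        have key2 : pvQ f n c j → (c ≤ j ∧ j ≤ e) ∨ pvQ f n (e + 1) j := by
          rintro ⟨a, b, h1, h2, h3, h4, h5, h6, h7⟩
          by_cases ha : e + 1 ≤ a
          · exact Or.inr ⟨a, b, ha, h2, h3, h4, h5, h6, h7⟩
          · have hfa : f a = f c := hconst a h1 (by omega)
            have hble : b ≤ e := by
              by_contra hb
              exact hmax ⟨by omega, by rw [h7 (e + 1) (by omega) (by omega), hfa]⟩
            exact Or.inl ⟨by omega, by omega⟩
        have key3 : pvQ f n (e + 1) j → pvQ f n c j := by
          rintro ⟨a, b, h1, hrest⟩; exact ⟨a, b, by omega, hrest⟩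
        by_cases h3 : 3 ≤ e - c + 1
        · rw [if_pos h3, IH (e + 1) _ (by omega), List.mem_append, List.mem_range'_1]
          have key1 : c ≤ j → j ≤ e → pvQ f n c j := by
            intro h1 h2
            exact ⟨c, e, le_refl c, h1, h2, hen, by omega, by omega, hconst⟩
          constructor
          · rintro ((h1 | h1) | h1)
            · exact Or.inl h1
            · exact Or.inr (key1 (by omega) (by omega))
            · exact Or.inr (key3 h1)
          · rintro (h1 | h1)
            · exact Or.inl (Or.inl h1)
            · rcases key2 h1 with ⟨h2, h4⟩ | h2
              · exact Or.inl (Or.inr ⟨h2, by omega⟩)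
              · exact Or.inr h2
        · rw [if_neg h3, IH (e + 1) acc (by omega)]
          constructor
          · rintro (h1 | h1)
            · exact Or.inl h1
            · exact Or.inr (key3 h1)
          · rintro (h1 | h1)
            · exact Or.inl h1
            · rcases key2 h1 with ⟨h2, h4⟩ | h2
              · rcases h1 with ⟨a, b, ha1, ha2, ha3, ha4, ha5, ha6, ha7⟩
                have hfa : f a = f c := hconst a ha1 (by omega)
                have hble : b ≤ e := by
                  by_contra hb
                  exact hmax ⟨by omega, by rw [ha7 (e + 1) (by omega) (by omega), hfa]⟩
                omega
              · exact Or.inr h2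
    · unfold pvScan
      rw [dif_neg hc]
      constructor
      · exact Or.inl
      · rintro (h1 | ⟨a, b, h1, h2, h3, h4, h5, h6, h7⟩)
        · exact h1
        · omega

-- pvQ from position 0 is exactly membership in a triple
lemma pvQ_zero_iff (f : Nat → Int) (n j : Nat) : pvQ f n 0 j ↔ pvMatched f n j := by
  constructor
  · rintro ⟨a, b, -, h2, h3, h4, h5, h6, h7⟩
    refine ⟨min j (b - 2), by omega, by omega, by omega, ?_, ?_, ?_⟩
    · rw [h7 (min j (b - 2)) (by omega) (by omega)]; exact h6
    · rw [h7 (min j (b - 2) + 1) (by omega) (by omega), h7 (min j (b - 2)) (by omega) (by omega)]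
    · rw [h7 (min j (b - 2) + 2) (by omega) (by omega), h7 (min j (b - 2)) (by omega) (by omega)]
  · rintro ⟨s, hs1, hs2, hn, hp, he1, he2⟩
    refine ⟨s, s + 2, by omega, hs1, hs2, hn, by omega, hp, ?_⟩
    intro k hk1 hk2
    rcases (by omega : k = s ∨ k = s + 1 ∨ k = s + 2) with rfl | rfl | rfl
    · rfl
    · exact he1
    · exact he2

lemma mem_pvScan_zero (f : Nat → Int) (n j : Nat) :
    j ∈ pvScan f n 0 [] ↔ pvMatched f n j := by
  rw [mem_pvScan_aux f n j n 0 [] (by omega)]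
  simp only [List.mem_nil_iff, false_or]
  exact pvQ_zero_iff f n j

-- membership through a foldl whose step adds elements described by C
lemma mem_foldl_gen {β : Type} (l : List β) (step : PySem.Set (Nat × Nat) → β → PySem.Set (Nat × Nat))
    (C : β → Nat × Nat → Prop) (h : ∀ s b x, x ∈ step s b ↔ x ∈ s ∨ C b x) :
    ∀ s x, x ∈ l.foldl step s ↔ x ∈ s ∨ ∃ b ∈ l, C b x := by
  induction l with
  | nil => simp
  | cons a l IH =>
    intro s x
    simp only [List.foldl_cons, IH, h, List.mem_cons]
    constructor
    · rintro ((h1 | h1) | ⟨b, hb, hc⟩)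
      · exact Or.inl h1
      · exact Or.inr ⟨a, Or.inl rfl, h1⟩
      · exact Or.inr ⟨b, Or.inr hb, hc⟩
    · rintro (h1 | ⟨b, (rfl | hb), hc⟩)
      · exact Or.inl (Or.inl h1)
      · exact Or.inl (Or.inr hc)
      · exact Or.inr ⟨b, hb, hc⟩

lemma nodup_foldl_gen {β : Type} (l : List β) (step : PySem.Set (Nat × Nat) → β → PySem.Set (Nat × Nat))
    (h : ∀ s b, List.Nodup s → List.Nodup (step s b)) :
    ∀ s, List.Nodup s → List.Nodup (l.foldl step s) := by
  induction l with
  | nil => intro s hs; exact hs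
  | cons a l IH => intro s hs; exact IH (step s a) (h s a hs)

lemma mem_pvFindA (grid : List (List Int)) (x : Nat × Nat) :
    x ∈ pvFindA grid ↔
      (x.1 < grid.length ∧ pvMatched (fun c => pvGet grid x.1 c) grid.length x.2) ∨
      (x.2 < grid.length ∧ pvMatched (fun r => pvGet grid r x.2) grid.length x.1) := by
  obtain ⟨x1, x2⟩ := x
  unfold pvFindA
  rw [mem_foldl_gen _ _ (fun c y => ∃ rr ∈ pvScan (fun r => pvGet grid r c) grid.length 0 [], y = (rr, c))
    (fun s b y => PySem.Set.mem_foldl_add _ _ s y),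
    mem_foldl_gen _ _ (fun r y => ∃ cc ∈ pvScan (fun c => pvGet grid r c) grid.length 0 [], y = (r, cc))
    (fun s b y => PySem.Set.mem_foldl_add _ _ s y)]
  simp only [PySem.Set.empty, List.mem_nil_iff, false_or, List.mem_range, mem_pvScan_zero]
  constructor
  · rintro (⟨r, hr, cc, hcc, heq⟩ | ⟨c, hc, rr, hrr, heq⟩) <;>
      rw [Prod.mk.injEq] at heq <;> obtain ⟨rfl, rfl⟩ := heq
    · exact Or.inl ⟨hr, hcc⟩
    · exact Or.inr ⟨hc, hrr⟩
  · rintro (⟨h1, h2⟩ | ⟨h1, h2⟩)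
    · exact Or.inl ⟨x1, h1, x2, h2, rfl⟩
    · exact Or.inr ⟨x2, h1, x1, h2, rfl⟩

lemma nodup_pvFindA (grid : List (List Int)) : List.Nodup (pvFindA grid) := by
  unfold pvFindA
  apply nodup_foldl_gen
  · intro s b hs
    exact nodup_foldl_gen _ _ (fun s cc h => PySem.Set.nodup_add s _ h) s hs
  · apply nodup_foldl_gen
    · intro s b hs
      exact nodup_foldl_gen _ _ (fun s cc h => PySem.Set.nodup_add s _ h) s hs
    · exact List.nodup_nil

lemma mem_pvFindB (grid : List (List Int)) (x : Nat × Nat) :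
    x ∈ pvFindB grid ↔
      (x.1 < grid.length ∧ pvMatched (fun c => pvGet grid x.1 c) grid.length x.2) ∨
      (x.2 < grid.length ∧ pvMatched (fun r => pvGet grid r x.2) grid.length x.1) := by
  obtain ⟨x1, x2⟩ := x
  have hinner : ∀ (r : Nat) (s : PySem.Set (Nat × Nat)) (y : Nat × Nat),
      y ∈ (List.range (grid.length - 2)).foldl
        (fun s c =>
          let val := pvGet grid r c
          if 0 < val ∧ pvGet grid r (c + 1) = val ∧ pvGet grid r (c + 2) = val then
            PySem.Set.add (PySem.Set.add (PySem.Set.add s (r, c)) (r, c + 1)) (r, c + 2)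
          else s) s ↔
      y ∈ s ∨ ∃ c, pvTriple (fun c => pvGet grid r c) grid.length c ∧
        (y = (r, c) ∨ y = (r, c + 1) ∨ y = (r, c + 2)) := by
    intro r s y
    rw [mem_foldl_gen _ _ (fun c y =>
      (0 < pvGet grid r c ∧ pvGet grid r (c + 1) = pvGet grid r c ∧ pvGet grid r (c + 2) = pvGet grid r c) ∧
      (y = (r, c) ∨ y = (r, c + 1) ∨ y = (r, c + 2))) ?_]
    · constructor
      · rintro (h | ⟨c, hc, h1, h2⟩)
        · exact Or.inl h
        · exact Or.inr ⟨c, ⟨by simp at hc; omega, h1⟩, h2⟩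
      · rintro (h | ⟨c, ⟨hc, h1⟩, h2⟩)
        · exact Or.inl h
        · exact Or.inr ⟨c, by simp; omega, h1, h2⟩
    · intro s c y
      by_cases hP : 0 < pvGet grid r c ∧ pvGet grid r (c + 1) = pvGet grid r c ∧ pvGet grid r (c + 2) = pvGet grid r c
      · rw [if_pos hP]
        simp only [PySem.Set.mem_add]
        tauto
      · rw [if_neg hP]
        tauto
  have hinner2 : ∀ (c : Nat) (s : PySem.Set (Nat × Nat)) (y : Nat × Nat),
      y ∈ (List.range (grid.length - 2)).foldl
        (fun s r =>
          let val := pvGet grid r c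
          if 0 < val ∧ pvGet grid (r + 1) c = val ∧ pvGet grid (r + 2) c = val then
            PySem.Set.add (PySem.Set.add (PySem.Set.add s (r, c)) (r + 1, c)) (r + 2, c)
          else s) s ↔
      y ∈ s ∨ ∃ r, pvTriple (fun r => pvGet grid r c) grid.length r ∧
        (y = (r, c) ∨ y = (r + 1, c) ∨ y = (r + 2, c)) := by
    intro c s y
    rw [mem_foldl_gen _ _ (fun r y =>
      (0 < pvGet grid r c ∧ pvGet grid (r + 1) c = pvGet grid r c ∧ pvGet grid (r + 2) c = pvGet grid r c) ∧
      (y = (r, c) ∨ y = (r + 1, c) ∨ y = (r + 2, c))) ?_]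
    · constructor
      · rintro (h | ⟨r, hr, h1, h2⟩)
        · exact Or.inl h
        · exact Or.inr ⟨r, ⟨by simp at hr; omega, h1⟩, h2⟩
      · rintro (h | ⟨r, ⟨hr, h1⟩, h2⟩)
        · exact Or.inl h
        · exact Or.inr ⟨r, by simp; omega, h1, h2⟩
    · intro s r y
      by_cases hP : 0 < pvGet grid r c ∧ pvGet grid (r + 1) c = pvGet grid r c ∧ pvGet grid (r + 2) c = pvGet grid r c
      · rw [if_pos hP]
        simp only [PySem.Set.mem_add]
        tauto
      · rw [if_neg hP]
        tauto
  unfold pvFindB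
  rw [mem_foldl_gen _ _ (fun c y => ∃ r, pvTriple (fun r => pvGet grid r c) grid.length r ∧
        (y = (r, c) ∨ y = (r + 1, c) ∨ y = (r + 2, c))) (fun s c y => hinner2 c s y),
    mem_foldl_gen _ _ (fun r y => ∃ c, pvTriple (fun c => pvGet grid r c) grid.length c ∧
        (y = (r, c) ∨ y = (r, c + 1) ∨ y = (r, c + 2))) (fun s r y => hinner r s y)]
  simp only [PySem.Set.empty, List.mem_nil_iff, false_or, List.mem_range]
  constructor
  · rintro (⟨r, hr, c, htrip, heq⟩ | ⟨c, hc, r, htrip, heq⟩)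
    · rcases heq with heq | heq | heq <;>
        (rw [Prod.mk.injEq] at heq; obtain ⟨h1, h2⟩ := heq; subst h1;
         exact Or.inl ⟨hr, c, by omega, by omega, htrip⟩)
    · rcases heq with heq | heq | heq <;>
        (rw [Prod.mk.injEq] at heq; obtain ⟨h1, h2⟩ := heq; subst h2;
         exact Or.inr ⟨hc, r, by omega, by omega, htrip⟩)
  · rintro (⟨h1, s, hs1, hs2, htrip⟩ | ⟨h1, s, hs1, hs2, htrip⟩)
    · refine Or.inl ⟨x1, h1, s, htrip, ?_⟩
      rcases (by omega : x2 = s ∨ x2 = s + 1 ∨ x2 = s + 2) with rfl | rfl | rfl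
      · exact Or.inl rfl
      · exact Or.inr (Or.inl rfl)
      · exact Or.inr (Or.inr rfl)
    · refine Or.inr ⟨x2, h1, s, htrip, ?_⟩
      rcases (by omega : x1 = s ∨ x1 = s + 1 ∨ x1 = s + 2) with rfl | rfl | rfl
      · exact Or.inl rfl
      · exact Or.inr (Or.inl rfl)
      · exact Or.inr (Or.inr rfl)

lemma nodup_pvFindB (grid : List (List Int)) : List.Nodup (pvFindB grid) := by
  unfold pvFindB
  have hstep : ∀ (e1 e2 e3 : Nat × Nat) (P : Prop) [Decidable P] (s : PySem.Set (Nat × Nat)),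
      List.Nodup s → List.Nodup (if P then PySem.Set.add (PySem.Set.add (PySem.Set.add s e1) e2) e3 else s) := by
    intro e1 e2 e3 P _ s hs
    split
    · exact PySem.Set.nodup_add _ _ (PySem.Set.nodup_add _ _ (PySem.Set.nodup_add _ _ hs))
    · exact hs
  apply nodup_foldl_gen
  · intro s b hs
    exact nodup_foldl_gen _ _ (fun s c h => hstep _ _ _ _ s h) s hs
  · apply nodup_foldl_gen
    · intro s b hs
      exact nodup_foldl_gen _ _ (fun s c h => hstep _ _ _ _ s h) s hs
    · exact List.nodup_nil

lemma pvFind_perm (grid : List (List Int)) : (pvFindA grid).Perm (pvFindB grid) := by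
  rw [List.perm_ext_iff_of_nodup (nodup_pvFindA grid) (nodup_pvFindB grid)]
  intro x
  rw [mem_pvFindA, mem_pvFindB]

-- zeroing a list of cells = masking by membership
def pvMask (p : Nat → Nat → Bool) (g : List (List Int)) : List (List Int) :=
  List.mapIdx (fun r row => List.mapIdx (fun c v => if p r c then 0 else v) row) g

lemma pvZero_eq_mask (m : List (Nat × Nat)) :
    ∀ g, pvZero m g = pvMask (fun r c => decide ((r, c) ∈ m)) g := by
  induction m with
  | nil =>
    intro g
    apply List.ext_getElem
    · simp [pvZero, pvMask]
    · intro i h1 h2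
      simp only [pvZero, List.foldl_nil] at h1 ⊢
      simp only [pvMask, List.getElem_mapIdx, List.mem_nil_iff, decide_false, Bool.false_eq_true,
        if_false]
      apply List.ext_getElem
      · simp
      · intro j hj1 hj2
        simp
  | cons a m IH =>
    intro g
    show pvZero m (pvSet g a.1 a.2 0) = _
    rw [IH]
    have hmc : ∀ i j : Nat, a.1 ≠ i ∨ a.2 ≠ j → (((i, j) ∈ a :: m) ↔ ((i, j) ∈ m)) := by
      intro i j hne
      rw [List.mem_cons]
      constructor
      · rintro (h | h)
        · exact absurd h.symm (by rw [Prod.ext_iff]; tauto)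
        · exact h
      · exact Or.inr
    apply List.ext_getElem
    · simp [pvMask, pvSet]
    · intro i h1 h2
      simp only [pvMask, List.getElem_mapIdx, pvSet, List.getElem_modify]
      by_cases hi : a.1 = i
      · rw [if_pos hi]
        apply List.ext_getElem
        · simp
        · intro j hj1 hj2
          simp only [List.getElem_mapIdx, List.getElem_set]
          by_cases hj : a.2 = j
          · have hmem : (i, j) ∈ a :: m := by
              rw [List.mem_cons]; left; rw [Prod.ext_iff]; exact ⟨hi.symm, hj.symm⟩
            simp [hj, hmem]
          · rw [if_neg hj]; simp only [hmc i j (Or.inr hj)]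
      · rw [if_neg hi]
        apply List.ext_getElem
        · simp
        · intro j hj1 hj2
          simp only [List.getElem_mapIdx]
          simp only [hmc i j (Or.inl hi)]

lemma pvZero_congr (m1 m2 : List (Nat × Nat)) (h : ∀ x, x ∈ m1 ↔ x ∈ m2)
    (g : List (List Int)) : pvZero m1 g = pvZero m2 g := by
  rw [pvZero_eq_mask, pvZero_eq_mask]
  congr 1
  funext r c
  simp only [decide_eq_decide]
  exact h (r, c)

lemma pvCascade_eq (fuel : Nat) : ∀ g total, pvCascadeA fuel g total = pvCascadeB fuel g total := by
  induction fuel with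
  | zero => intro g total; rfl
  | succ fuel IH =>
    intro g total
    have hperm := pvFind_perm g
    have hmem : ∀ x, x ∈ pvFindA g ↔ x ∈ pvFindB g := fun x => hperm.mem_iff
    have hlen : (pvFindA g).length = (pvFindB g).length := hperm.length_eq
    simp only [pvCascadeA, pvCascadeB]
    by_cases hA : pvFindA g = []
    · have hB : pvFindB g = [] := by
        have := hperm; rw [hA] at this; exact this.symm.eq_nil
      rw [if_pos hA, if_pos hB]
    · have hB : pvFindB g ≠ [] := by
        intro h; rw [h] at hperm; exact hA hperm.eq_nil
      rw [if_neg hA, if_neg hB, hlen, pvZero_congr _ _ hmem g]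
      exact IH _ _

-- ===== VERDICT (by name: the statement is the Claim_ definition above) =====
theorem resolve_cascade_spec : Claim_equal_resolve_cascade := by
  intro grid _ _
  unfold Spec_resolve_cascade resolve_cascade resolve_cascade_alt
  exact pvCascade_eq _ grid 0
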